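-- pv_equiv track=rewrite | github.com/ZianRaian/Python-Problems | Username Change Solution.py | possibleChanges
-- ===== SOURCE A (Python) =====
-- def possibleChanges(usernames):
--     results = []
--
--     for username in usernames:
--         found = False
--         min_right = username[-1]  # Smallest character encountered from the right
--
--         # Traverse from right to left
--         for i in range(len(username) - 2, -1, -1):
--             if username[i] > min_right:  # If a left character is greater than a right character
--                 found = True
--                 break
--             min_right = min(min_right, username[i])  # Update the smallest character found
--
--         results.append("YES" if found else "NO")
--
--     return results
-- ===== SOURCE B (Python) =====
-- def possibleChanges(usernames):
--     # A username needs no change iff it is already non-decreasing,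
--     # i.e. equal to its sorted form.
--     return ["NO" if list(u) == sorted(u) else "YES" for u in usernames]
-- ===== Notes on version B (the rewrite author's own statement) =====
-- stated objective: simpler
-- what changed: Replaces A's right-to-left running-minimum scan with break by a one-line 'sort then compare': a username needs no change iff it equals its sorted form.
import Mathlib
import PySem

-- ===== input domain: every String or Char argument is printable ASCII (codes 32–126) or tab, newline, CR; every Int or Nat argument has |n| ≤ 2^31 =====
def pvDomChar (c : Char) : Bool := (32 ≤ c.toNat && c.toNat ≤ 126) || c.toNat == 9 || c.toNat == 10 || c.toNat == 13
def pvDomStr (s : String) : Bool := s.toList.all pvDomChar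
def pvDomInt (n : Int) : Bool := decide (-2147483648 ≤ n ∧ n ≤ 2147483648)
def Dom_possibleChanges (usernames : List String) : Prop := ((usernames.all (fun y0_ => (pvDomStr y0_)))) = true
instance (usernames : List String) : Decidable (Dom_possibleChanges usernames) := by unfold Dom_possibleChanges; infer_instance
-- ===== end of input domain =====

-- B replaces A's right-to-left running-minimum scan by "a username needs no
-- change iff it equals its sorted form" (simpler); A raises IndexError on an
-- empty username, so Pre_ excludes lists containing one.


-- ===== PORT A =====
-- the inner right-to-left loop of A, with its break (returns `found`)
def pvLoopA (cs : List Char) : List Int → Char → Bool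
  | [], _ => false
  | i :: rest, minRight =>
    match PySem.List.pyGet? cs i with
    | none => false   -- unreachable for indices of range(len-2, -1, -1)
    | some c => if c > minRight then true else pvLoopA cs rest (min minRight c)

def possibleChanges (usernames : List String) : List String :=
  usernames.foldl (fun results username =>
    let cs := username.toList
    match PySem.List.pyGet? cs (-1) with
    | none => results   -- Python raises IndexError here; excluded by Pre_
    | some minRight =>
      results ++
        [if pvLoopA cs (PySem.List.pyRange ((cs.length : Int) - 2) (-1) (-1)) minRight
         then "YES" else "NO"]) []

-- ===== PORT B =====
def possibleChanges_alt (usernames : List String) : List String :=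
  usernames.map (fun u =>
    if u.toList = PySem.List.sorted u.toList (fun c => c) false then "NO" else "YES")

-- ===== PRECONDITION & SPEC =====
-- Pre_ excludes lists containing an empty username: there A raises IndexError on username[-1].
def Pre_possibleChanges (usernames : List String) : Prop :=
  ∀ u ∈ usernames, u ≠ ""
instance (usernames : List String) : Decidable (Pre_possibleChanges usernames) := by
  unfold Pre_possibleChanges; infer_instance

def pvWitness_possibleChanges : List String := ["cba", "abc", "a"]

def Spec_possibleChanges (usernames : List String) (out : List String) : Prop :=
  out = possibleChanges_alt usernames
instance (usernames : List String) (out : List String) : Decidable (Spec_possibleChanges usernames out) := by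
  unfold Spec_possibleChanges; infer_instance

-- ===== CLAIM (what is proved, stated in full; the proofs are below) =====
def Claim_equal_possibleChanges : Prop :=
  ∀ (usernames : List String), Dom_possibleChanges usernames →
    Pre_possibleChanges usernames →
    Spec_possibleChanges usernames (possibleChanges usernames)

-- ===== LEMMAS AND PROOFS =====

-- proof-level view of the inner loop: scan the reversed prefix keeping the running minimum
def pvChk : List Char → Char → Bool
  | [], _ => false
  | c :: rest, m => if c > m then true else pvChk rest (min m c)

lemma pvLoopA_eq_chk (cs : List Char) (k : Nat) (hk : k < cs.length) (m : Char) :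
    pvLoopA cs (PySem.List.pyRange (k : Int) (-1) (-1)) m
      = pvChk ((cs.take (k + 1)).reverse) m := by
  induction k generalizing m with
  | zero =>
    rw [PySem.List.pyRange_neg_one_cons (by omega), PySem.List.pyRange_neg_one_eq_nil (by omega)]
    have h0 : PySem.List.pyGet? cs (0 : Int) = some cs[0] :=
      PySem.List.pyGet?_ofNat cs 0 hk
    have htake : cs.take 1 = [cs[0]] := by
      cases cs with
      | nil => simp at hk
      | cons a t => simp
    simp [pvLoopA, pvChk, h0, htake]
  | succ k ih =>
    rw [PySem.List.pyRange_neg_one_cons (by omega)]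
    have hget : PySem.List.pyGet? cs ((k : Int) + 1) = some cs[k + 1] := by
      have := PySem.List.pyGet?_ofNat cs (k + 1) hk
      simpa [Int.natCast_succ] using this
    have htake : cs.take (k + 1 + 1) = cs.take (k + 1) ++ [cs[k + 1]] :=
      List.take_succ_eq_append_getElem hk
    have hcast : ((k + 1 : Nat) : Int) = (k : Int) + 1 := by push_cast; ring
    rw [hcast, show ((k : Int) + 1 - 1) = (k : Int) by ring]
    simp only [pvLoopA, hget]
    rw [htake, List.reverse_append, List.reverse_singleton]
    simp only [List.singleton_append, pvChk]
    split
    · rfl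
    · exact ih (by omega) _

lemma pvChk_false_iff (rs : List Char) (m : Char) :
    pvChk rs m = false ↔ (m :: rs).Pairwise (fun a b => b ≤ a) := by
  induction rs generalizing m with
  | nil => simp [pvChk]
  | cons c rest ih =>
    by_cases h : c > m
    · simp only [pvChk, if_pos h]
      constructor
      · intro hf; exact absurd hf (by simp)
      · intro hp
        exact absurd ((List.pairwise_cons.mp hp).1 c (by simp)) (not_le.mpr h)
    · have hcm : c ≤ m := not_lt.mp h
      have hmin : min m c = c := min_eq_right hcm
      simp only [pvChk, if_neg h, hmin, ih]
      constructor
      · intro hp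
        refine List.Pairwise.cons ?_ hp
        intro x hx
        rcases List.mem_cons.mp hx with hx | hx
        · exact hx ▸ hcm
        · exact le_trans ((List.pairwise_cons.mp hp).1 x hx) hcm
      · intro hp
        exact (List.pairwise_cons.mp hp).2

lemma sorted_id_eq_iff (cs : List Char) :
    cs = PySem.List.sorted cs (fun c => c) false ↔ cs.Pairwise (· ≤ ·) := by
  constructor
  · intro h
    have hp := PySem.List.sorted_pairwise cs (fun c => c)
    rw [← h] at hp
    simpa using hp
  · intro h
    exact (PySem.List.sorted_eq_self_of_pairwise cs (fun c => c) (by simpa using h)).symm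

lemma per_string (u : String) (hu : u ≠ "") (acc : List String) :
    (match PySem.List.pyGet? u.toList (-1) with
     | none => acc
     | some mr =>
       acc ++ [if pvLoopA u.toList (PySem.List.pyRange ((u.toList.length : Int) - 2) (-1) (-1)) mr
        then "YES" else "NO"])
    = acc ++ [if u.toList = PySem.List.sorted u.toList (fun c => c) false then "NO" else "YES"] := by
  set cs := u.toList with hcs
  have hne : cs ≠ [] := by
    intro h
    apply hu
    have : u.toList = "".toList := by simp [← hcs, h]
    exact String.toList_inj.mp this
  have hlast : PySem.List.pyGet? cs (-1) = some (cs.getLast hne) := by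
    rw [PySem.List.pyGet?_neg_one, List.getLast?_eq_some_getLast]
  rw [hlast]
  have hrev : cs.reverse = cs.getLast hne :: (cs.take (cs.length - 1)).reverse := by
    rw [← List.dropLast_eq_take, ← List.reverse_concat', List.dropLast_concat_getLast]
  have key : pvLoopA cs (PySem.List.pyRange ((cs.length : Int) - 2) (-1) (-1)) (cs.getLast hne)
      = !decide (cs = PySem.List.sorted cs (fun c => c) false) := by
    rcases Nat.lt_or_ge cs.length 2 with h2 | h2
    · -- length 1: inner range empty, loop returns false; a singleton is sorted
      have h1 : cs.length = 1 := by
        have := List.length_pos_of_ne_nil hne; omega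
      have hnilrange : PySem.List.pyRange ((cs.length : Int) - 2) (-1) (-1) = [] := by
        rw [h1]; exact PySem.List.pyRange_neg_one_eq_nil (by norm_num)
      have hsorted : cs = PySem.List.sorted cs (fun c => c) false := by
        rw [sorted_id_eq_iff]
        obtain ⟨a, ha⟩ := List.length_eq_one_iff.mp h1
        simp [ha]
      have hd : decide (cs = PySem.List.sorted cs (fun c => c) false) = true :=
        decide_eq_true hsorted
      rw [hnilrange, hd]
      rfl
    · have hk : cs.length - 2 < cs.length := by omega
      have hcast : ((cs.length : Int) - 2) = ((cs.length - 2 : Nat) : Int) := by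
        push_cast [Nat.cast_sub (by omega : 2 ≤ cs.length)]; ring
      rw [hcast, pvLoopA_eq_chk cs (cs.length - 2) hk]
      have htk : cs.length - 2 + 1 = cs.length - 1 := by omega
      rw [htk]
      rcases Bool.eq_false_or_eq_true (pvChk (cs.take (cs.length - 1)).reverse (cs.getLast hne)) with hb | hb
      · -- loop found a violation: cs is not sorted
        rw [hb]
        have hp : ¬ cs.Pairwise (· ≤ ·) := by
          intro hp
          have hfalse : pvChk (cs.take (cs.length - 1)).reverse (cs.getLast hne) = false := by
            rw [pvChk_false_iff, ← hrev, List.pairwise_reverse]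
            exact hp
          rw [hb] at hfalse
          exact absurd hfalse (by simp)
        have hns : ¬ cs = PySem.List.sorted cs (fun c => c) false :=
          fun h => hp ((sorted_id_eq_iff cs).mp h)
        simp [hns]
      · -- no violation: cs is sorted
        rw [hb]
        have hp := (pvChk_false_iff _ _).mp hb
        rw [← hrev, List.pairwise_reverse] at hp
        have hss : cs = PySem.List.sorted cs (fun c => c) false := (sorted_id_eq_iff cs).mpr hp
        simp [decide_eq_true hss]
  simp only [key]
  rcases Bool.eq_false_or_eq_true (decide (cs = PySem.List.sorted cs (fun c => c) false)) with hd | hd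
  · simp only [hd, Bool.not_true, if_pos (of_decide_eq_true hd)]
    simp
  · simp only [hd, Bool.not_false, if_neg (of_decide_eq_false hd)]
    simp

lemma foldl_step (usernames : List String) (hpre : ∀ u ∈ usernames, u ≠ "") (acc : List String) :
    usernames.foldl (fun results username =>
      let cs := username.toList
      match PySem.List.pyGet? cs (-1) with
      | none => results
      | some minRight =>
        results ++
          [if pvLoopA cs (PySem.List.pyRange ((cs.length : Int) - 2) (-1) (-1)) minRight
           then "YES" else "NO"]) acc
    = acc ++ usernames.map (fun u =>
        if u.toList = PySem.List.sorted u.toList (fun c => c) false then "NO" else "YES") := by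
  induction usernames generalizing acc with
  | nil => simp
  | cons u rest ih =>
    have hu : u ≠ "" := hpre u (by simp)
    simp only [List.foldl_cons, List.map_cons]
    rw [per_string u hu acc, ih (fun v hv => hpre v (by simp [hv]))]
    simp

theorem possibleChanges_spec : Claim_equal_possibleChanges := by
  intro usernames _ hpre
  unfold Spec_possibleChanges possibleChanges possibleChanges_alt
  simpa using foldl_step usernames hpre []
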